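-- pv_equiv track=rewrite | github.com/timledlie/AdventOfCode | 2022/17/src.py | apply_jet
-- ===== SOURCE A (Python) =====
-- def apply_jet(jet, rock_points, all_rock_points):
--     new_rock_points = set()
--     change = 1 if jet == '>' else -1
--     for point in rock_points:
--         new_point = (point[0] + change, point[1])
--         if (new_point[0] < 0) or (new_point[0] >= 7) or (new_point in all_rock_points):
--             return rock_points
--         new_rock_points.add(new_point)
--     return new_rock_points
-- ===== SOURCE B (Python) =====
-- def apply_jet(jet, rock_points, all_rock_points):
--     change = 1 if jet == '>' else -1
--     xs = [p[0] for p in rock_points]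
--     if xs and (min(xs) + change < 0 or max(xs) + change >= 7):
--         return rock_points
--     rock_set = set(rock_points)
--     if any((q[0] - change, q[1]) in rock_set for q in all_rock_points):
--         return rock_points
--     return {(p[0] + change, p[1]) for p in rock_points}
-- ===== Notes on version B (the rewrite author's own statement) =====
-- stated objective: alternative
-- what changed: Instead of shifting each rock point and testing it against walls and settled rocks with an early-exit loop, B decides the wall collision once in closed form from min/max of the x-coordinates, and decides the rock collision by the inverted scan: iterate over the settled rocks and ask whether each one's pre-image under the shift lies in a precomputed set of the rock's points; only then is the shifted set built.
import Mathlib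
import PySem

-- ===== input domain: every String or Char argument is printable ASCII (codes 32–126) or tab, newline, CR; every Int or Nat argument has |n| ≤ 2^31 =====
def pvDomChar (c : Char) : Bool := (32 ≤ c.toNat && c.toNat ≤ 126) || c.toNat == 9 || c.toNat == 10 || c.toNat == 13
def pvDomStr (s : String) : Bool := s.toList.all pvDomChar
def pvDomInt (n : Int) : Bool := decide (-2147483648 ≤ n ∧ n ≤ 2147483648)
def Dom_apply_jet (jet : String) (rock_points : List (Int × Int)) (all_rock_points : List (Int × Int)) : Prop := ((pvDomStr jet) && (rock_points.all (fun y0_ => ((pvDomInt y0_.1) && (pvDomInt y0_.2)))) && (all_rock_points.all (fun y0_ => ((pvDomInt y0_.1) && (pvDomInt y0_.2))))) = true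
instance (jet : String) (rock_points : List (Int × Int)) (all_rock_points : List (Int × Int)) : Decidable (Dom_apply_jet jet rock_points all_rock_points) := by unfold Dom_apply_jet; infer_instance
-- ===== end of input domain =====

-- B decides the wall hit in closed form from min/max of the x-coordinates and the rock
-- collision by the inverted scan (settled rocks against a set of the rock's points),
-- instead of A's per-point shift-and-check loop; objective: alternative.
-- Inputs/outputs are Python sets (List = distinct elements, compared as finite sets).

-- ===== PORT A =====
-- A's loop: shift one point, return rock_points at the first invalid one, else add it
-- to the accumulating set new_rock_points.
def apply_jet_loop (change : Int) (rock_points all_rock_points : List (Int × Int))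
    (new_rock_points : PySem.Set (Int × Int)) : List (Int × Int) → List (Int × Int)
  | [] => new_rock_points
  | point :: rest =>
      let new_point : Int × Int := (point.1 + change, point.2)
      if new_point.1 < 0 ∨ new_point.1 ≥ 7 ∨ new_point ∈ all_rock_points then
        rock_points
      else
        apply_jet_loop change rock_points all_rock_points
          (PySem.Set.add new_rock_points new_point) rest

def apply_jet (jet : String) (rock_points : List (Int × Int)) (all_rock_points : List (Int × Int)) : List (Int × Int) :=
  let change : Int := if jet = ">" then 1 else -1
  apply_jet_loop change rock_points all_rock_points PySem.Set.empty rock_points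

-- ===== PORT B =====
-- Python's `min(xs)`/`max(xs)` are reached only under the `xs and …` guard, so the
-- `.getD 0` default below is never the value of the guard when xs ≠ [].
def apply_jet_alt (jet : String) (rock_points : List (Int × Int)) (all_rock_points : List (Int × Int)) : List (Int × Int) :=
  let change : Int := if jet = ">" then 1 else -1
  let xs : List Int := rock_points.map Prod.fst
  if xs ≠ [] ∧ ((PySem.List.min? xs (fun x => x)).getD 0 + change < 0 ∨
                (PySem.List.max? xs (fun x => x)).getD 0 + change ≥ 7) then
    rock_points
  else
    let rock_set : PySem.Set (Int × Int) := PySem.Set.ofList rock_points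
    if all_rock_points.any (fun q => PySem.Set.contains rock_set (q.1 - change, q.2)) then
      rock_points
    else
      PySem.Set.ofList (rock_points.map (fun p => (p.1 + change, p.2)))

-- ===== PRECONDITION & SPEC =====
def Spec_apply_jet (jet : String) (rock_points : List (Int × Int)) (all_rock_points : List (Int × Int)) (out : List (Int × Int)) : Prop := out = apply_jet_alt jet rock_points all_rock_points
instance (jet : String) (rock_points : List (Int × Int)) (all_rock_points : List (Int × Int)) (out : List (Int × Int)) : Decidable (Spec_apply_jet jet rock_points all_rock_points out) := by unfold Spec_apply_jet; infer_instance

-- ===== CLAIM =====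
def Claim_equal_apply_jet : Prop := ∀ (jet : String) (rock_points : List (Int × Int)) (all_rock_points : List (Int × Int)), Dom_apply_jet jet rock_points all_rock_points → Spec_apply_jet jet rock_points all_rock_points (apply_jet jet rock_points all_rock_points)

-- ===== LEMMAS AND PROOFS =====

-- the invalidity test, as a Bool on a shifted point
def pvBad (all_rock_points : List (Int × Int)) (x : Int × Int) : Bool :=
  decide (x.1 < 0) || decide (x.1 ≥ 7) || all_rock_points.contains x

theorem pvBad_iff (all : List (Int × Int)) (x : Int × Int) :
    pvBad all x = true ↔ (x.1 < 0 ∨ x.1 ≥ 7 ∨ x ∈ all) := by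
  simp [pvBad]; tauto

-- A's loop equals: if some shifted point of l is bad, rock_points; else fold add over l's shifts
theorem apply_jet_loop_eq (change : Int) (rock all : List (Int × Int))
    (l : List (Int × Int)) (acc : PySem.Set (Int × Int)) :
    apply_jet_loop change rock all acc l =
      if (l.map (fun p => (p.1 + change, p.2))).any (pvBad all) then rock
      else (l.map (fun p => (p.1 + change, p.2))).foldl PySem.Set.add acc := by
  induction l generalizing acc with
  | nil => simp [apply_jet_loop]
  | cons p rest ih =>
      simp only [apply_jet_loop, List.map_cons, List.any_cons, List.foldl_cons]
      by_cases h : ((p.1 + change : Int), p.2).1 < 0 ∨ ((p.1 + change : Int), p.2).1 ≥ 7 ∨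
          ((p.1 + change : Int), p.2) ∈ all
      · rw [if_pos h, if_pos]
        simp only [pvBad_iff _ _ |>.mpr h, Bool.true_or]
      · rw [if_neg h, ih]
        have hb : pvBad all ((p.1 + change : Int), p.2) = false := by
          rw [Bool.eq_false_iff]; intro hc; exact h ((pvBad_iff _ _).mp hc)
        simp only [hb, Bool.false_or]

-- some shifted point hits a wall ⟺ the min/max closed form fires
theorem wall_char (change : Int) (rock : List (Int × Int)) :
    ((rock.map (fun p => (p.1 + change, p.2))).any
        (fun x => decide (x.1 < 0) || decide (x.1 ≥ 7)) = true) ↔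
      (rock.map Prod.fst ≠ [] ∧
        ((PySem.List.min? (rock.map Prod.fst) (fun x => x)).getD 0 + change < 0 ∨
         (PySem.List.max? (rock.map Prod.fst) (fun x => x)).getD 0 + change ≥ 7)) := by
  cases rock with
  | nil => simp
  | cons r t =>
    have hne : (r :: t).map Prod.fst ≠ [] := by simp
    obtain ⟨mn, hmn⟩ : ∃ m, PySem.List.min? ((r :: t).map Prod.fst) (fun x => x) = some m := by
      cases h : PySem.List.min? ((r :: t).map Prod.fst) (fun x => x) with
      | some m => exact ⟨m, rfl⟩
      | none => exact absurd ((PySem.List.min?_eq_none_iff _ _).mp h) hne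
    obtain ⟨mx, hmx⟩ : ∃ m, PySem.List.max? ((r :: t).map Prod.fst) (fun x => x) = some m := by
      cases h : PySem.List.max? ((r :: t).map Prod.fst) (fun x => x) with
      | some m => exact ⟨m, rfl⟩
      | none => exact absurd ((PySem.List.max?_eq_none_iff _ _).mp h) hne
    have hmnmem := PySem.List.min?_mem hmn
    have hmxmem := PySem.List.max?_mem hmx
    have hmnmin := PySem.List.min?_isMin hmn
    have hmxmax := PySem.List.max?_isMax hmx
    rw [hmn, hmx]
    simp only [Option.getD_some, ne_eq, hne, not_false_eq_true, true_and]
    constructor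
    · intro h
      obtain ⟨x, hx, hb⟩ := List.any_eq_true.mp h
      obtain ⟨p, hp, rfl⟩ := List.mem_map.mp hx
      have hpx : p.1 ∈ (r :: t).map Prod.fst := List.mem_map.mpr ⟨p, hp, rfl⟩
      simp only [Bool.or_eq_true, decide_eq_true_eq] at hb
      rcases hb with h1 | h2
      · exact Or.inl (by have := hmnmin p.1 hpx; omega)
      · exact Or.inr (by have := hmxmax p.1 hpx; omega)
    · intro h
      rw [List.any_eq_true]
      rcases h with h1 | h2
      · obtain ⟨p, hp, hpe⟩ := List.mem_map.mp hmnmem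
        exact ⟨(p.1 + change, p.2), List.mem_map.mpr ⟨p, hp, rfl⟩,
          by simp only [Bool.or_eq_true, decide_eq_true_eq]; omega⟩
      · obtain ⟨p, hp, hpe⟩ := List.mem_map.mp hmxmem
        exact ⟨(p.1 + change, p.2), List.mem_map.mpr ⟨p, hp, rfl⟩,
          by simp only [Bool.or_eq_true, decide_eq_true_eq]; omega⟩

-- some shifted point lies in `all` ⟺ some settled rock's pre-image lies in the rock's point set
theorem coll_char (change : Int) (rock all : List (Int × Int)) :
    ((rock.map (fun p => (p.1 + change, p.2))).any (fun x => all.contains x) = true) ↔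
      (all.any (fun q => PySem.Set.contains (PySem.Set.ofList rock) (q.1 - change, q.2)) = true) := by
  simp only [List.any_eq_true, List.mem_map, List.contains_eq_mem, decide_eq_true_eq,
    PySem.Set.contains]
  constructor
  · rintro ⟨x, ⟨p, hp, rfl⟩, hq⟩
    refine ⟨(p.1 + change, p.2), hq, ?_⟩
    have : (p.1 + change - change, p.2) = p := by
      obtain ⟨a, b⟩ := p; simp
    simp only [this, PySem.Set.mem_ofList]
    exact hp
  · rintro ⟨q, hq, hmem⟩
    simp only [PySem.Set.mem_ofList] at hmem
    refine ⟨((q.1 - change) + change, q.2), ⟨(q.1 - change, q.2), hmem, rfl⟩, ?_⟩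
    have : ((q.1 - change) + change, q.2) = q := by
      obtain ⟨a, b⟩ := q; simp
    rw [this]; exact hq

-- ===== VERDICT =====
theorem apply_jet_spec : Claim_equal_apply_jet := by
  intro jet rock all _
  show apply_jet jet rock all = apply_jet_alt jet rock all
  dsimp only [apply_jet, apply_jet_alt]
  generalize (if jet = ">" then (1 : Int) else -1) = change
  rw [apply_jet_loop_eq]
  have split : ((rock.map (fun p => (p.1 + change, p.2))).any (pvBad all) = true) ↔
      ((rock.map (fun p => (p.1 + change, p.2))).any
          (fun x => decide (x.1 < 0) || decide (x.1 ≥ 7)) = true) ∨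
      ((rock.map (fun p => (p.1 + change, p.2))).any (fun x => all.contains x) = true) := by
    simp only [pvBad, List.any_eq_true, Bool.or_eq_true]
    constructor
    · rintro ⟨x, hx, h⟩; rcases h with (h | h) | h
      · exact Or.inl ⟨x, hx, Or.inl h⟩
      · exact Or.inl ⟨x, hx, Or.inr h⟩
      · exact Or.inr ⟨x, hx, h⟩
    · rintro (⟨x, hx, h⟩ | ⟨x, hx, h⟩)
      · rcases h with h | h
        · exact ⟨x, hx, Or.inl (Or.inl h)⟩
        · exact ⟨x, hx, Or.inl (Or.inr h)⟩
      · exact ⟨x, hx, Or.inr h⟩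
  have hiff := split.trans (or_congr (wall_char change rock) (coll_char change rock all))
  by_cases hW : (rock.map Prod.fst ≠ [] ∧
      ((PySem.List.min? (rock.map Prod.fst) (fun x => x)).getD 0 + change < 0 ∨
       (PySem.List.max? (rock.map Prod.fst) (fun x => x)).getD 0 + change ≥ 7))
  · have hb : (rock.map (fun p => (p.1 + change, p.2))).any (pvBad all) = true :=
      hiff.mpr (Or.inl hW)
    rw [hb, if_pos rfl, if_pos hW]
  · by_cases hC : (all.any
        (fun q => PySem.Set.contains (PySem.Set.ofList rock) (q.1 - change, q.2)) = true)
    · have hb : (rock.map (fun p => (p.1 + change, p.2))).any (pvBad all) = true :=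
        hiff.mpr (Or.inr hC)
      rw [hb, if_pos rfl, if_neg hW, if_pos hC]
    · have hb : (rock.map (fun p => (p.1 + change, p.2))).any (pvBad all) = false := by
        rw [Bool.eq_false_iff]
        intro h
        rcases hiff.mp h with h | h
        · exact hW h
        · exact hC h
      rw [hb, if_neg Bool.false_ne_true, if_neg hW, if_neg hC]
      rfl
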